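-- pv_equiv track=rewrite | github.com/TeogopK/Data_Structures_and_Algorithms_FMI | Exams/Seminar/Historical/final_exam_2024/Task4/py_solution_prim.py | through_all
-- ===== SOURCE A (Python) =====
-- from heapq import heappush, heappop
--
-- def prim(start, visited, graph):
--     pq = [(0, start)]
--     mst_weight = 0
--
--     newly_seen = set([start]) # keeps track of the newly added vertices
--     reached = 0
--
--     while reached != len(newly_seen):
--         current_weight, current_vertex = heappop(pq)
--
--         if current_vertex in visited:
--             continue
--
--         reached += 1
--
--         visited.add(current_vertex)
--         mst_weight += current_weight
--
--         for neighb, weight in graph[current_vertex]: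
--             if neighb in visited:
--                 continue
--
--             newly_seen.add(neighb)
--             heappush(pq, (weight, neighb))
--
--     return mst_weight, reached
--
-- def through_all(K, graph):
--     visited = set()
--     total_weight = 0
--
--     for vertex in graph:
--         if vertex in visited:
--             continue
--
--         tree_weight, vertices_added = prim(vertex, visited, graph)
--
--         if vertices_added % K == 0:
--             total_weight += tree_weight
--
--     return total_weight
-- ===== SOURCE B (Python) =====
-- def through_all(K, graph):
--     # Prim's by frontier rescan: no heap, no pending bookkeeping -- each round
--     # picks the lightest edge leaving the current tree by scanning it directly.
--     visited = set()
--     total_weight = 0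
--     for start in graph:
--         if start in visited:
--             continue
--         visited.add(start)
--         tree = [start]
--         tree_weight = 0
--         while True:
--             cut = [(w, u) for v in tree for u, w in graph[v] if u not in visited]
--             if not cut:
--                 break
--             w, u = min(cut)
--             visited.add(u)
--             tree.append(u)
--             tree_weight += w
--
--         if len(tree) % K == 0:
--             total_weight += tree_weight
--     return total_weight
-- ===== Notes on version B (the rewrite author's own statement) =====
-- stated objective: simpler
-- what changed: Replaced Prim's with a lazy-deletion heap plus newly_seen/reached bookkeeping by frontier-rescan Prim: each round recomputes the lightest edge leaving the current tree by a direct scan (no priority queue, no pending set, no stale entries), one short function instead of two.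
import Mathlib
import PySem

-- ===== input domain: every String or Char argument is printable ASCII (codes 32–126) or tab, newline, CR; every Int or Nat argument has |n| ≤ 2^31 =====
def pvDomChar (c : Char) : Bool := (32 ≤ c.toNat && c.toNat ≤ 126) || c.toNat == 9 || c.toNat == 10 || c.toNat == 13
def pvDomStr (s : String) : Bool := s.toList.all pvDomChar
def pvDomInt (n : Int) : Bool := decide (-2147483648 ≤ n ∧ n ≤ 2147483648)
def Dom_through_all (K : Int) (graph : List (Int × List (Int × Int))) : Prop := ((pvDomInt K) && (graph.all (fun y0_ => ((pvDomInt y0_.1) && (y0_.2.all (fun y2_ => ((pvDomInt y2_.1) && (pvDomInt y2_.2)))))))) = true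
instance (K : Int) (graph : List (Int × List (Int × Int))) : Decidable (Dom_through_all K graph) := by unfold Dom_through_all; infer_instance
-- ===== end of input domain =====

-- B replaces A's heap-based lazy-deletion Prim (plus newly_seen/reached bookkeeping) by a
-- frontier-rescan Prim that recomputes the lightest edge leaving the tree each round: simpler
-- (one short function, no priority queue, no pending set). A mutates no caller-visible state.

-- ===== PORT A =====

-- Python's min over a list of (Int, Int) pairs = min2? with the two projections as keys
-- (tuple comparison is lexicographic; on Ints 'a == b' is '¬ a < b ∧ ¬ b < a').
def pvMin2 (l : List (Int × Int)) : Option (Int × Int) :=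
  PySem.List.min2? l (fun p => p.1) (fun p => p.2)

-- Σ over still-unvisited keys of (1 + len(adjacency list)): an upper bound on the number of
-- remaining iterations of the while loop; used only to pick a sufficient fuel for the ports.
def pvCost (g : PySem.Dict Int (List (Int × Int))) (ks : List Int) (visited : PySem.Set Int) : Nat :=
  ((ks.filter (fun v => !(PySem.Set.contains visited v))).map (fun v => (g.getD v []).length + 1)).sum

-- the while loop of prim(). The heap is used only through heappush/heappop, whose observable
-- behaviour is exactly min-extraction from the multiset of pushed pairs: heappush = append,
-- heappop = remove the least pair (pvMin2 + erase) — exact. Fuel only makes the recursion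
-- structural; the 0 branch and the empty-heap branch are never reached (the call site passes
-- fuel > pvCost, a bound on the iteration count, and Python's heappop never sees an empty heap).
def primLoop (g : PySem.Dict Int (List (Int × Int))) :
    Nat → List (Int × Int) → PySem.Set Int → PySem.Set Int → Int → Int → Int × Int × PySem.Set Int
  | 0, _, visited, _, reached, w => (w, reached, visited)
  | fuel+1, pq, visited, ns, reached, w =>
    if reached == PySem.Set.len ns then (w, reached, visited)
    else
      match pvMin2 pq with
      | none => (w, reached, visited)
      | some cur =>
        let pq1 := pq.erase cur
        if PySem.Set.contains visited cur.2 then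
          primLoop g fuel pq1 visited ns reached w
        else
          let visited1 := PySem.Set.add visited cur.2
          -- 'for neighb, weight in graph[current_vertex]': inside Pre_ the vertex is a key,
          -- so getD only differs from Python where Python raises KeyError (excluded by Pre_)
          let st := (g.getD cur.2 []).foldl
            (fun (s : PySem.Set Int × List (Int × Int)) p =>
              if PySem.Set.contains visited1 p.1 then s
              else (PySem.Set.add s.1 p.1, s.2 ++ [(p.2, p.1)]))
            (ns, pq1)
          primLoop g fuel st.2 visited1 st.1 (reached + 1) (w + cur.1)

def through_all (K : Int) (graph : List (Int × List (Int × Int))) : Int :=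
  let g := PySem.Dict.mk graph   -- the Python dict: first binding wins, keys in first-occurrence order
  let ks := PySem.List.dedup (graph.map (·.1))
  let fuel := 2 + pvCost g ks (PySem.Set.empty : PySem.Set Int)
  (ks.foldl
    (fun (s : PySem.Set Int × Int) v =>
      if PySem.Set.contains s.1 v then s
      else
        let t := primLoop g fuel [((0 : Int), v)] s.1 (PySem.Set.ofList [v]) 0 0
        -- 'vertices_added % K == 0' (K ≠ 0 inside Pre_ whenever this line runs)
        if PySem.Int.mod t.2.1 K == 0 then (t.2.2, s.2 + t.1) else (t.2.2, s.2))
    ((PySem.Set.empty : PySem.Set Int), (0 : Int))).2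

-- ===== PORT B =====

-- the cut comprehension: [(w, u) for v in tree for u, w in graph[v] if u not in visited]
-- (getD is exact inside Pre_, where every tree vertex is a key of the dict)
def pvCutList (g : PySem.Dict Int (List (Int × Int))) (tree : List Int) (visited : PySem.Set Int) :
    List (Int × Int) :=
  tree.flatMap (fun v =>
    ((g.getD v []).filter (fun p => !(PySem.Set.contains visited p.1))).map (fun p => (p.2, p.1)))

-- B's while loop: 'if not cut: break' and 'min(cut)' are together the match on pvMin2 cut
-- (none exactly when the cut is empty). Fuel only structural; 0 branch unreachable.
def altLoop (g : PySem.Dict Int (List (Int × Int))) :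
    Nat → List Int → PySem.Set Int → Int → Int × List Int × PySem.Set Int
  | 0, tree, visited, w => (w, tree, visited)
  | fuel+1, tree, visited, w =>
    match pvMin2 (pvCutList g tree visited) with
    | none => (w, tree, visited)
    | some m => altLoop g fuel (tree ++ [m.2]) (PySem.Set.add visited m.2) (w + m.1)

def through_all_alt (K : Int) (graph : List (Int × List (Int × Int))) : Int :=
  let g := PySem.Dict.mk graph
  let ks := PySem.List.dedup (graph.map (·.1))
  let fuel := 2 + pvCost g ks (PySem.Set.empty : PySem.Set Int)
  (ks.foldl
    (fun (s : PySem.Set Int × Int) v =>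
      if PySem.Set.contains s.1 v then s
      else
        let t := altLoop g fuel [v] (PySem.Set.add s.1 v) 0
        if PySem.Int.mod ((t.2.1.length : Nat) : Int) K == 0 then (t.2.2, s.2 + t.1) else (t.2.2, s.2))
    ((PySem.Set.empty : PySem.Set Int), (0 : Int))).2

-- ===== PRECONDITION & SPEC =====

-- Pre_ excludes exactly the inputs on which the Python raises: K = 0 with a non-empty graph
-- (ZeroDivisionError in 'vertices_added % K') and a listed neighbour that is not a key of the
-- dict (every listed neighbour of a key eventually gets visited and then 'graph[current_vertex]'
-- raises KeyError).
def Pre_through_all (K : Int) (graph : List (Int × List (Int × Int))) : Prop :=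
  (graph = [] ∨ K ≠ 0) ∧
  ∀ v ∈ graph.map (·.1), ∀ q ∈ (PySem.Dict.mk graph).getD v [], q.1 ∈ graph.map (·.1)
instance (K : Int) (graph : List (Int × List (Int × Int))) : Decidable (Pre_through_all K graph) := by
  unfold Pre_through_all; infer_instance

def pvWitness_through_all : Int × (List (Int × List (Int × Int))) :=
  (2, [(0, [(1, 5)]), (1, [(0, 5)]), (7, [])])

def Spec_through_all (K : Int) (graph : List (Int × List (Int × Int))) (out : Int) : Prop :=
  out = through_all_alt K graph
instance (K : Int) (graph : List (Int × List (Int × Int))) (out : Int) : Decidable (Spec_through_all K graph out) := by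
  unfold Spec_through_all; infer_instance

-- ===== CLAIM (what is proved, stated in full; the proofs are below) =====
def Claim_equal_through_all : Prop := ∀ (K : Int) (graph : List (Int × List (Int × Int))), Dom_through_all K graph → Pre_through_all K graph → Spec_through_all K graph (through_all K graph)

-- ===== LEMMAS AND PROOFS =====

-- strict lexicographic order on pairs, as a Bool (the comparison pvMin2's fold uses)
def pvLtb (a b : Int × Int) : Bool :=
  decide (a.1 < b.1) || (!decide (b.1 < a.1) && decide (a.2 < b.2))

lemma pvLtb_antisymm {a b : Int × Int} (h1 : pvLtb a b = false) (h2 : pvLtb b a = false) : a = b := by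
  rcases a with ⟨a1, a2⟩; rcases b with ⟨b1, b2⟩
  simp [pvLtb] at h1 h2
  have : a1 = b1 := by omega
  subst this
  have : a2 = b2 := by omega
  simp [this]

def pvStep (acc : Option (Int × Int)) (x : Int × Int) : Option (Int × Int) :=
  match acc with
  | none => some x
  | some m => if pvLtb x m then some x else some m

lemma pvMin2_eq_fold (l : List (Int × Int)) : pvMin2 l = l.foldl pvStep none := by
  unfold pvMin2 PySem.List.min2? pvStep pvLtb
  congr 1
  funext acc x
  cases acc <;> rfl

lemma pvLtb_irrefl (a : Int × Int) : pvLtb a a = false := by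
  simp [pvLtb]

lemma pvLtb_neg_trans {a b c : Int × Int} (h1 : pvLtb a b = false) (h2 : pvLtb b c = false) :
    pvLtb a c = false := by
  rcases a with ⟨a1, a2⟩; rcases b with ⟨b1, b2⟩; rcases c with ⟨c1, c2⟩
  simp [pvLtb] at *
  omega

lemma pvMinFold : ∀ (l : List (Int × Int)) (acc : Option (Int × Int)) (m : Int × Int),
    l.foldl pvStep acc = some m →
    (m ∈ l ∨ acc = some m) ∧ (∀ p ∈ l, pvLtb p m = false) ∧
      (∀ a, acc = some a → pvLtb a m = false) := by
  intro l
  induction l with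
  | nil =>
    intro acc m h
    simp at h
    refine ⟨Or.inr h, by simp, ?_⟩
    intro a ha; rw [h] at ha
    cases ha; exact pvLtb_irrefl m
  | cons x t ih =>
    intro acc m h
    simp only [List.foldl_cons] at h
    obtain ⟨hmem, hleast, hacc⟩ := ih (pvStep acc x) m h
    have hx : pvLtb x m = false := by
      cases acc with
      | none => exact hacc x rfl
      | some a =>
        by_cases hlt : pvLtb x a = true
        · exact hacc x (by simp [pvStep, hlt])
        · have ha : pvLtb a m = false := hacc a (by simp [pvStep, Bool.eq_false_iff.mpr hlt])
          exact pvLtb_neg_trans (Bool.eq_false_iff.mpr hlt) ha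
    refine ⟨?_, ?_, ?_⟩
    · rcases hmem with h1 | h1
      · exact Or.inl (List.mem_cons_of_mem _ h1)
      · cases acc with
        | none =>
          simp [pvStep] at h1
          exact Or.inl (h1 ▸ List.mem_cons_self ..)
        | some a =>
          by_cases hlt : pvLtb x a = true
          · simp [pvStep, hlt] at h1
            exact Or.inl (h1 ▸ List.mem_cons_self ..)
          · simp [pvStep, Bool.eq_false_iff.mpr hlt] at h1
            exact Or.inr (by rw [h1])
    · intro p hp
      rcases List.mem_cons.mp hp with h1 | h1
      · exact h1 ▸ hx
      · exact hleast p h1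
    · intro a ha
      cases ha
      by_cases hlt : pvLtb x a = true
      · have hxm : pvLtb x m = false := hx
        -- a not less than m: otherwise x < a ≤ ... use components
        rcases a with ⟨a1, a2⟩; rcases x with ⟨x1, x2⟩; rcases m with ⟨m1, m2⟩
        have h1 := hacc (x1, x2) (by simp [pvStep, hlt])
        simp [pvLtb] at hlt h1 ⊢
        omega
      · exact hacc a (by simp [pvStep, Bool.eq_false_iff.mpr hlt])

lemma pvMin2_spec (l : List (Int × Int)) (m : Int × Int)
    (h : pvMin2 l = some m) : m ∈ l ∧ ∀ p ∈ l, pvLtb p m = false := by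
  rw [pvMin2_eq_fold] at h
  obtain ⟨hmem, hleast, -⟩ := pvMinFold l none m h
  exact ⟨hmem.resolve_right (by simp), hleast⟩

lemma pvFoldSome : ∀ (l : List (Int × Int)) (a : Int × Int),
    l.foldl pvStep (some a) ≠ none := by
  intro l
  induction l with
  | nil => intro a; simp
  | cons x t ih =>
    intro a
    simp only [List.foldl_cons, pvStep]
    split <;> exact ih _

lemma pvMin2_none_iff (l : List (Int × Int)) : pvMin2 l = none ↔ l = [] := by
  cases l with
  | nil => simp [pvMin2_eq_fold]
  | cons x t =>
    simp only [pvMin2_eq_fold, List.foldl_cons]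
    constructor
    · intro h
      exact absurd h (by simpa [pvStep] using pvFoldSome t x)
    · intro h; cases h

lemma pvMemCut (g : PySem.Dict Int (List (Int × Int))) (tree : List Int)
    (visited : PySem.Set Int) (p : Int × Int) :
    p ∈ pvCutList g tree visited ↔
      ∃ v ∈ tree, (p.2, p.1) ∈ g.getD v [] ∧ PySem.Set.contains visited p.2 = false := by
  rcases p with ⟨pw, pu⟩
  simp only [pvCutList, List.mem_flatMap, List.mem_map, List.mem_filter]
  constructor
  · rintro ⟨v, hv, ⟨u, w⟩, ⟨hu, hc⟩, he⟩
    cases he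
    exact ⟨v, hv, hu, by simpa using hc⟩
  · rintro ⟨v, hv, hu, hc⟩
    exact ⟨v, hv, ⟨pu, pw⟩, ⟨hu, by simpa using hc⟩, rfl⟩

lemma pvFoldPair (c : Int × Int → Bool) :
    ∀ (l : List (Int × Int)) (ns : PySem.Set Int) (pq : List (Int × Int)),
    l.foldl (fun (s : PySem.Set Int × List (Int × Int)) p =>
        if c p then s else (PySem.Set.add s.1 p.1, s.2 ++ [(p.2, p.1)])) (ns, pq)
      = (l.foldl (fun s p => if c p then s else PySem.Set.add s p.1) ns,
         pq ++ (l.filter (fun p => !(c p))).map (fun p => (p.2, p.1))) := by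
  intro l
  induction l with
  | nil => intro ns pq; simp
  | cons x t ih =>
    intro ns pq
    by_cases hc : c x
    · simp [hc, ih]
    · simp [hc, ih]

lemma pvMemFoldAdd (c : Int × Int → Bool) :
    ∀ (l : List (Int × Int)) (s : PySem.Set Int) (x : Int),
    (x ∈ l.foldl (fun s p => if c p then s else PySem.Set.add s p.1) s ↔
      x ∈ s ∨ ∃ p ∈ l, c p = false ∧ x = p.1) := by
  intro l
  induction l with
  | nil => intro s x; simp
  | cons a t ih =>
    intro s x
    simp only [List.foldl_cons]
    cases hc : c a with
    | true =>
      rw [if_pos rfl, ih]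
      constructor
      · rintro (h | ⟨p, hp, h1, h2⟩)
        · exact Or.inl h
        · exact Or.inr ⟨p, List.mem_cons_of_mem _ hp, h1, h2⟩
      · rintro (h | ⟨p, hp, h1, h2⟩)
        · exact Or.inl h
        · rcases List.mem_cons.mp hp with rfl | hp'
          · rw [hc] at h1; cases h1
          · exact Or.inr ⟨p, hp', h1, h2⟩
    | false =>
      rw [if_neg (by simp), ih]
      constructor
      · rintro (h | ⟨p, hp, h1, h2⟩)
        · rcases (PySem.Set.mem_add _ _ _).mp h with h' | h'
          · exact Or.inl h'
          · exact Or.inr ⟨a, List.mem_cons_self .., hc, h'⟩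
        · exact Or.inr ⟨p, List.mem_cons_of_mem _ hp, h1, h2⟩
      · rintro (h | ⟨p, hp, h1, h2⟩)
        · exact Or.inl ((PySem.Set.mem_add _ _ _).mpr (Or.inl h))
        · rcases List.mem_cons.mp hp with rfl | hp'
          · exact Or.inl ((PySem.Set.mem_add _ _ _).mpr (Or.inr h2))
          · exact Or.inr ⟨p, hp', h1, h2⟩

lemma pvNodupFoldAdd (c : Int × Int → Bool) :
    ∀ (l : List (Int × Int)) (s : PySem.Set Int), s.Nodup →
    (l.foldl (fun s p => if c p then s else PySem.Set.add s p.1) s).Nodup := by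
  intro l
  induction l with
  | nil => intro s hs; simpa
  | cons a t ih =>
    intro s hs
    by_cases hc : c a
    · simpa [hc] using ih s hs
    · simpa [hc] using ih _ (PySem.Set.nodup_add _ _ hs)

lemma pvContains_add_of_ne (visited : PySem.Set Int) (u x : Int) (hne : x ≠ u) :
    PySem.Set.contains (PySem.Set.add visited u) x = PySem.Set.contains visited x := by
  by_cases hx : x ∈ visited
  · rw [(PySem.Set.contains_iff _ _).mpr ((PySem.Set.mem_add _ _ _).mpr (Or.inl hx)),
      (PySem.Set.contains_iff _ _).mpr hx]
  · have h1 : x ∉ PySem.Set.add visited u := fun h =>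
      ((PySem.Set.mem_add _ _ _).mp h).elim hx hne
    rw [Bool.eq_false_iff.mpr (fun h => h1 ((PySem.Set.contains_iff _ _).mp h)),
      Bool.eq_false_iff.mpr (fun h => hx ((PySem.Set.contains_iff _ _).mp h))]

lemma pvCost_mono (g : PySem.Dict Int (List (Int × Int))) :
    ∀ (ks : List Int) (v1 v2 : PySem.Set Int),
    (∀ x, PySem.Set.contains v1 x = true → PySem.Set.contains v2 x = true) →
    pvCost g ks v2 ≤ pvCost g ks v1 := by
  intro ks
  induction ks with
  | nil => intro v1 v2 h; simp [pvCost]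
  | cons k t ih =>
    intro v1 v2 h
    have iht := ih v1 v2 h
    unfold pvCost at iht ⊢
    simp only [List.filter_cons]
    cases h1 : PySem.Set.contains v1 k with
    | true =>
      simp only [h k h1, Bool.not_true]
      simpa using iht
    | false =>
      cases h2 : PySem.Set.contains v2 k with
      | true =>
        simp only [Bool.not_true, Bool.not_false]
        simp only [Bool.false_eq_true, if_false, if_true, List.map_cons, List.sum_cons]
        omega
      | false =>
        simp only [Bool.not_false, if_true, List.map_cons, List.sum_cons]
        omega

lemma pvCost_add (g : PySem.Dict Int (List (Int × Int))) :
    ∀ (ks : List Int), ks.Nodup → ∀ (v : Int), v ∈ ks →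
    ∀ (visited : PySem.Set Int), PySem.Set.contains visited v = false →
    pvCost g ks (PySem.Set.add visited v) + ((g.getD v []).length + 1) ≤ pvCost g ks visited := by
  intro ks
  induction ks with
  | nil => intro _ v hv; cases hv
  | cons k t ih =>
    intro hnd v hv visited hnv
    have hmono : ∀ x, PySem.Set.contains visited x = true →
        PySem.Set.contains (PySem.Set.add visited v) x = true := by
      intro x hx
      exact (PySem.Set.contains_iff _ _).mpr
        ((PySem.Set.mem_add _ _ _).mpr (Or.inl ((PySem.Set.contains_iff _ _).mp hx)))
    rcases List.mem_cons.mp hv with rfl | hvt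
    · have hcv : PySem.Set.contains (PySem.Set.add visited v) v = true :=
        (PySem.Set.contains_iff _ _).mpr ((PySem.Set.mem_add _ _ _).mpr (Or.inr rfl))
      have hmt := pvCost_mono g t visited (PySem.Set.add visited v) hmono
      unfold pvCost at hmt ⊢
      simp only [List.filter_cons, hcv, hnv, Bool.not_true, Bool.not_false]
      simp only [Bool.false_eq_true, if_false, if_true, List.map_cons, List.sum_cons]
      omega
    · have hkv : k ≠ v := fun h => (List.nodup_cons.mp hnd).1 (h ▸ hvt)
      have hck : PySem.Set.contains (PySem.Set.add visited v) k = PySem.Set.contains visited k :=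
        pvContains_add_of_ne _ _ _ hkv
      have iht := ih (List.nodup_cons.mp hnd).2 v hvt visited hnv
      unfold pvCost at iht ⊢
      simp only [List.filter_cons, hck]
      cases hc : PySem.Set.contains visited k with
      | true => simpa [hc] using iht
      | false =>
        simp only [Bool.not_false, if_true, List.map_cons, List.sum_cons]
        omega

lemma pvGetD_nil (graph : List (Int × List (Int × Int))) :
    ∀ (v : Int), v ∉ graph.map (·.1) → (PySem.Dict.mk graph).getD v [] = [] := by
  induction graph with
  | nil => intro v _; rfl
  | cons p t ih =>
    intro v hv
    simp only [List.map_cons, List.mem_cons] at hv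
    rw [PySem.Dict.getD_eq_get?_getD]
    rcases p with ⟨k, adj⟩
    rw [PySem.Dict.get?_mk_cons]
    have hne : (k == v) = false :=
      beq_eq_false_iff_ne.mpr (fun h => hv (Or.inl h.symm))
    rw [hne]
    simp only [Bool.false_eq_true, if_false]
    have := ih v (fun h => hv (Or.inr h))
    rw [PySem.Dict.getD_eq_get?_getD] at this
    exact this

lemma pvAltNodup (g : PySem.Dict Int (List (Int × Int))) :
    ∀ (fuel : Nat) (tree : List Int) (visited : PySem.Set Int) (w : Int), visited.Nodup →
    ((altLoop g fuel tree visited w).2.2).Nodup := by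
  intro fuel
  induction fuel with
  | zero => intro tree visited w h; simpa [altLoop]
  | succ n ih =>
    intro tree visited w h
    rw [altLoop]
    cases hm : pvMin2 (pvCutList g tree visited) with
    | none => simpa
    | some m => exact ih _ _ _ (PySem.Set.nodup_add _ _ h)

-- the loop invariant tying A's state (pq, visited, newly_seen) to B's state (tree, visited)
def pvInv (g : PySem.Dict Int (List (Int × Int))) (pq : List (Int × Int))
    (visited ns : PySem.Set Int) (tree : List Int) : Prop :=
  tree.Nodup ∧ (∀ t ∈ tree, PySem.Set.contains visited t = true) ∧
  visited.Nodup ∧ ns.Nodup ∧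
  (∀ p : Int × Int, (p ∈ pq ∧ PySem.Set.contains visited p.2 = false) ↔ p ∈ pvCutList g tree visited) ∧
  (∀ x : Int, x ∈ ns ↔ x ∈ tree ∨ ∃ p ∈ pq, p.2 = x ∧ PySem.Set.contains visited p.2 = false)

lemma pvLoopSim (g : PySem.Dict Int (List (Int × Int))) (ks : List Int)
    (hnd : ks.Nodup) (hks : ∀ v : Int, v ∉ ks → g.getD v [] = []) :
    ∀ (fa fb : Nat) (pq : List (Int × Int)) (visited ns : PySem.Set Int) (tree : List Int) (w : Int),
      pvInv g pq visited ns tree →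
      pq.length + pvCost g ks visited < fa → fa ≤ fb →
      primLoop g fa pq visited ns ((tree.length : Nat) : Int) w =
        (fun r => (r.1, ((r.2.1.length : Nat) : Int), r.2.2)) (altLoop g fb tree visited w) := by
  intro fa
  induction fa with
  | zero => intro fb pq visited ns tree w _ hfa _; omega
  | succ n ih =>
    intro fb pq visited ns tree w hinv hfa hfb
    obtain ⟨htn, htv, hvn, hnn, hcut, hns⟩ := hinv
    have htsub : ∀ x ∈ tree, x ∈ ns := fun x hx => (hns x).mpr (Or.inl hx)
    by_cases hstop : pvCutList g tree visited = []
    · -- the cut is empty: A's loop condition holds, B's min is none; both stop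
      have hsub2 : ∀ x ∈ ns, x ∈ tree := by
        intro x hx
        rcases (hns x).mp hx with h | ⟨p, hp, hpx, hpv⟩
        · exact h
        · exact absurd ((hcut p).mp ⟨hp, hpv⟩) (by rw [hstop]; simp)
      have hleneq : tree.length = ns.length :=
        ((List.perm_ext_iff_of_nodup htn hnn).mpr (fun a => ⟨htsub a, hsub2 a⟩)).length_eq
      have hcond : (((tree.length : Nat) : Int) == PySem.Set.len ns) = true :=
        beq_iff_eq.mpr (by simp [PySem.Set.len, hleneq])
      have hB : altLoop g fb tree visited w = (w, tree, visited) := by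
        cases fb with
        | zero => rfl
        | succ k =>
          rw [altLoop, hstop]
          rfl
      rw [hB]
      simp only [primLoop, hcond, if_true]
    · -- the cut is non-empty: A pops the least pair of the heap
      obtain ⟨p0, hp0⟩ := List.exists_mem_of_ne_nil _ hstop
      obtain ⟨hp0pq, hp0v⟩ := (hcut p0).mpr hp0
      have hp0t : p0.2 ∉ tree := fun h => by rw [htv p0.2 h] at hp0v; cases hp0v
      have hlenlt : tree.length < ns.length := by
        have hsp : List.Subperm (tree ++ [p0.2]) ns :=
          List.Nodup.subperm
            (by simp only [List.nodup_append, List.nodup_cons, List.not_mem_nil,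
                  not_false_iff, List.nodup_nil, true_and, and_true]
                exact ⟨htn, fun a ha b hb => by
                  simp only [List.mem_singleton] at hb
                  subst hb
                  exact fun he => hp0t (by rw [← he]; exact ha)⟩)
            (by
              intro x hx
              rcases List.mem_append.mp hx with h | h
              · exact htsub x h
              · have : x = p0.2 := by simpa using h
                exact this ▸ (hns p0.2).mpr (Or.inr ⟨p0, hp0pq, rfl, hp0v⟩))
        have := hsp.length_le
        simp at this
        omega
      have hcond : (((tree.length : Nat) : Int) == PySem.Set.len ns) = false :=
        beq_eq_false_iff_ne.mpr (by simp [PySem.Set.len]; omega)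
      obtain ⟨m, hmin⟩ : ∃ m, pvMin2 pq = some m := by
        cases hm : pvMin2 pq with
        | none =>
          rw [pvMin2_none_iff] at hm
          rw [hm] at hp0pq
          cases hp0pq
        | some m => exact ⟨m, rfl⟩
      obtain ⟨hmmem, hleast⟩ := pvMin2_spec pq m hmin
      rcases m with ⟨mw, mu⟩
      cases hst : PySem.Set.contains visited mu with
      | true =>
        -- stale pop: the popped vertex is already visited; A skips, B's state unchanged
        have hgoal : primLoop g (n+1) pq visited ns ((tree.length : Nat) : Int) w =
            primLoop g n (pq.erase (mw, mu)) visited ns ((tree.length : Nat) : Int) w := by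
          simp only [primLoop, hcond, hmin, hst]
          rfl
        rw [hgoal]
        refine ih fb (pq.erase (mw, mu)) visited ns tree w ⟨htn, htv, hvn, hnn, ?_, ?_⟩ ?_ (by omega)
        · intro p
          constructor
          · rintro ⟨hp, hpv⟩
            exact (hcut p).mp ⟨List.mem_of_mem_erase hp, hpv⟩
          · intro hp
            obtain ⟨hppq, hpv⟩ := (hcut p).mpr hp
            have hne : p ≠ (mw, mu) := fun h => by rw [h] at hpv; rw [hst] at hpv; cases hpv
            exact ⟨(List.mem_erase_of_ne hne).mpr hppq, hpv⟩
        · intro x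
          rw [hns x]
          constructor
          · rintro (h | ⟨p, hp, hpx, hpv⟩)
            · exact Or.inl h
            · have hne : p ≠ (mw, mu) := fun h => by rw [h] at hpv; rw [hst] at hpv; cases hpv
              exact Or.inr ⟨p, (List.mem_erase_of_ne hne).mpr hp, hpx, hpv⟩
          · rintro (h | ⟨p, hp, hpx, hpv⟩)
            · exact Or.inl h
            · exact Or.inr ⟨p, List.mem_of_mem_erase hp, hpx, hpv⟩
        · have := List.length_erase_of_mem hmmem
          have hpq : pq.length ≠ 0 := fun h => by rw [List.length_eq_zero_iff.mp h] at hmmem; cases hmmem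
          omega
      | false =>
        -- accepted pop: (mw, mu) is the least cut edge; B takes the same step
        have hmcut : (mw, mu) ∈ pvCutList g tree visited := (hcut (mw, mu)).mp ⟨hmmem, hst⟩
        have hmin2 : pvMin2 (pvCutList g tree visited) = some (mw, mu) := by
          obtain ⟨m', hm'⟩ : ∃ m', pvMin2 (pvCutList g tree visited) = some m' := by
            cases hm : pvMin2 (pvCutList g tree visited) with
            | none => rw [pvMin2_none_iff] at hm; exact absurd hm hstop
            | some m' => exact ⟨m', rfl⟩
          obtain ⟨hm'mem, hm'least⟩ := pvMin2_spec _ _ hm'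
          have h1 : pvLtb m' (mw, mu) = false := by
            obtain ⟨hm'pq, -⟩ := (hcut m').mpr hm'mem
            exact hleast m' hm'pq
          have h2 : pvLtb (mw, mu) m' = false := hm'least _ hmcut
          rw [hm', pvLtb_antisymm h1 h2]
        obtain ⟨fb', rfl⟩ : ∃ fb', fb = fb' + 1 := ⟨fb - 1, by omega⟩
        have hmut : mu ∉ tree := fun h => by rw [htv mu h] at hst; cases hst
        have hmuv1 : PySem.Set.contains (PySem.Set.add visited mu) mu = true :=
          (PySem.Set.contains_iff _ _).mpr ((PySem.Set.mem_add _ _ _).mpr (Or.inr rfl))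
        have hgoalB : altLoop g (fb' + 1) tree visited w =
            altLoop g fb' (tree ++ [mu]) (PySem.Set.add visited mu) (w + mw) := by
          rw [altLoop, hmin2]
        have hgoalA : primLoop g (n+1) pq visited ns ((tree.length : Nat) : Int) w =
            primLoop g n
              (pq.erase (mw, mu) ++
                ((g.getD mu []).filter
                  (fun p => !(PySem.Set.contains (PySem.Set.add visited mu) p.1))).map (fun p => (p.2, p.1)))
              (PySem.Set.add visited mu)
              ((g.getD mu []).foldl
                (fun s p => if PySem.Set.contains (PySem.Set.add visited mu) p.1 then s
                  else PySem.Set.add s p.1) ns)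
              (((tree.length : Nat) : Int) + 1) (w + mw) := by
          simp only [primLoop, hcond, hmin, hst]
          rw [pvFoldPair (fun p => PySem.Set.contains (PySem.Set.add visited mu) p.1) (g.getD mu []) ns (pq.erase (mw, mu))]
          rfl
        rw [hgoalA, hgoalB]
        have hlen1 : (((tree.length : Nat) : Int) + 1) = (((tree ++ [mu]).length : Nat) : Int) := by
          simp
        rw [hlen1]
        have hpush : ∀ pw pu : Int,
            ((pw, pu) ∈ ((g.getD mu []).filter
                (fun p => !(PySem.Set.contains (PySem.Set.add visited mu) p.1))).map (fun p => (p.2, p.1)) ↔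
              ((pu, pw) ∈ g.getD mu [] ∧ PySem.Set.contains (PySem.Set.add visited mu) pu = false)) := by
          intro pw pu
          simp only [List.mem_map, List.mem_filter, Bool.not_eq_eq_eq_not, Bool.not_true]
          constructor
          · rintro ⟨⟨u, uw⟩, ⟨h1, h2⟩, he⟩
            rw [Prod.mk.injEq] at he
            obtain ⟨rfl, rfl⟩ := he
            exact ⟨h1, h2⟩
          · rintro ⟨h1, h2⟩
            exact ⟨(pu, pw), ⟨h1, h2⟩, rfl⟩
        refine ih fb'
          _ _ _ (tree ++ [mu]) (w + mw) ⟨?_, ?_, PySem.Set.nodup_add _ _ hvn, pvNodupFoldAdd _ _ _ hnn, ?_, ?_⟩ ?_ (by omega)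
        · simp only [List.nodup_append, List.nodup_cons, List.not_mem_nil,
            not_false_iff, List.nodup_nil, true_and, and_true]
          exact ⟨htn, fun a ha b hb => by
            simp only [List.mem_singleton] at hb
            subst hb
            exact fun he => hmut (by rw [← he]; exact ha)⟩
        · intro t ht
          rcases List.mem_append.mp ht with h | h
          · exact (PySem.Set.contains_iff _ _).mpr
              ((PySem.Set.mem_add _ _ _).mpr (Or.inl ((PySem.Set.contains_iff _ _).mp (htv t h))))
          · have : t = mu := by simpa using h
            exact this ▸ hmuv1
        · rintro ⟨pw, pu⟩
          constructor
          · rintro ⟨hp, hpu⟩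
            have hpune : pu ≠ mu := fun h => by rw [h, hmuv1] at hpu; cases hpu
            have hpuv : PySem.Set.contains visited pu = false := by
              rw [← pvContains_add_of_ne visited mu pu hpune]; exact hpu
            rcases List.mem_append.mp hp with h | h
            · obtain ⟨v, hv, he, -⟩ := (pvMemCut g tree visited (pw, pu)).mp
                ((hcut (pw, pu)).mp ⟨List.mem_of_mem_erase h, hpuv⟩)
              exact (pvMemCut ..).mpr ⟨v, List.mem_append.mpr (Or.inl hv), he, hpu⟩
            · obtain ⟨h1, h2⟩ := (hpush pw pu).mp h
              exact (pvMemCut ..).mpr ⟨mu, List.mem_append.mpr (Or.inr (by simp)), h1, h2⟩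
          · intro hp
            obtain ⟨v, hv, he, hpu⟩ := (pvMemCut g (tree ++ [mu]) (PySem.Set.add visited mu) (pw, pu)).mp hp
            refine ⟨?_, hpu⟩
            have hpune : pu ≠ mu := fun h => by rw [h, hmuv1] at hpu; cases hpu
            have hpuv : PySem.Set.contains visited pu = false := by
              rw [← pvContains_add_of_ne visited mu pu hpune]; exact hpu
            rcases List.mem_append.mp hv with hvt | hvm
            · have hppq : (pw, pu) ∈ pq :=
                ((hcut (pw, pu)).mpr ((pvMemCut g tree visited (pw, pu)).mpr ⟨v, hvt, he, hpuv⟩)).1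
              have hne : (pw, pu) ≠ (mw, mu) := fun hh => hpune (congrArg Prod.snd hh)
              exact List.mem_append.mpr (Or.inl ((List.mem_erase_of_ne hne).mpr hppq))
            · have hvmu : v = mu := by simpa using hvm
              exact List.mem_append.mpr (Or.inr ((hpush pw pu).mpr ⟨hvmu ▸ he, hpu⟩))
        · intro x
          rw [pvMemFoldAdd (fun p => PySem.Set.contains (PySem.Set.add visited mu) p.1) (g.getD mu []) ns x]
          constructor
          · rintro (hx | ⟨q, hq, hqc, rfl⟩)
            · rcases (hns x).mp hx with h | ⟨p, hp, hpx, hpv⟩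
              · exact Or.inl (List.mem_append.mpr (Or.inl h))
              · by_cases hxm : x = mu
                · exact Or.inl (List.mem_append.mpr (Or.inr (by simp [hxm])))
                · have hne : p ≠ (mw, mu) := fun hh => hxm (hpx ▸ congrArg Prod.snd hh)
                  refine Or.inr ⟨p, List.mem_append.mpr (Or.inl ((List.mem_erase_of_ne hne).mpr hp)), hpx, ?_⟩
                  rw [hpx, pvContains_add_of_ne visited mu x hxm, ← hpx]
                  exact hpv
            · refine Or.inr ⟨(q.2, q.1), List.mem_append.mpr (Or.inr ((hpush q.2 q.1).mpr ⟨by simp [hq], hqc⟩)), rfl, hqc⟩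
          · rintro (hx | ⟨p, hp, hpx, hpv⟩)
            · rcases List.mem_append.mp hx with h | h
              · exact Or.inl ((hns x).mpr (Or.inl h))
              · have hxm : x = mu := by simpa using h
                exact Or.inl ((hns x).mpr (Or.inr ⟨(mw, mu), hmmem, hxm.symm, hst⟩))
            · rcases List.mem_append.mp hp with h | h
              · have hppq : p ∈ pq := List.mem_of_mem_erase h
                have hxmu : x ≠ mu := fun hh => by
                  rw [hpx, hh, hmuv1] at hpv; cases hpv
                have hpv' : PySem.Set.contains visited p.2 = false := by
                  rw [hpx, ← pvContains_add_of_ne visited mu x hxmu, ← hpx]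
                  exact hpv
                exact Or.inl ((hns x).mpr (Or.inr ⟨p, hppq, hpx, hpv'⟩))
              · rcases p with ⟨pw, pu⟩
                obtain ⟨h1, h2⟩ := (hpush pw pu).mp h
                exact Or.inr ⟨(pu, pw), h1, by exact h2, by simp [← hpx]⟩
        · have herase : (pq.erase (mw, mu)).length = pq.length - 1 := List.length_erase_of_mem hmmem
          have hpq0 : pq.length ≠ 0 := fun h => by rw [List.length_eq_zero_iff.mp h] at hmmem; cases hmmem
          have hpl : (((g.getD mu []).filter
              (fun p => !(PySem.Set.contains (PySem.Set.add visited mu) p.1))).map (fun p => (p.2, p.1))).length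
                ≤ (g.getD mu []).length := by
            rw [List.length_map]
            exact List.length_filter_le _ _
          rw [List.length_append]
          by_cases hmk : mu ∈ ks
          · have := pvCost_add g ks hnd mu hmk visited hst
            omega
          · have hadj : g.getD mu [] = [] := hks mu hmk
            have hpush0 : (((g.getD mu []).filter
                (fun p => !(PySem.Set.contains (PySem.Set.add visited mu) p.1))).map (fun p => (p.2, p.1))).length = 0 := by
              rw [hadj]; rfl
            have hmono := pvCost_mono g ks visited (PySem.Set.add visited mu)
              (fun x hx => (PySem.Set.contains_iff _ _).mpr
                ((PySem.Set.mem_add _ _ _).mpr (Or.inl ((PySem.Set.contains_iff _ _).mp hx))))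
            omega


-- one call of prim(vertex, visited, graph): A's first iteration accepts the start vertex,
-- after which pvLoopSim carries both loops to the same result
lemma pvKeyStep (g : PySem.Dict Int (List (Int × Int))) (ks : List Int)
    (hnd : ks.Nodup) (hks : ∀ v : Int, v ∉ ks → g.getD v [] = [])
    (visited : PySem.Set Int) (hvn : visited.Nodup) (v : Int)
    (hv : PySem.Set.contains visited v = false) :
    primLoop g (2 + pvCost g ks PySem.Set.empty) [((0 : Int), v)] visited (PySem.Set.ofList [v]) 0 0 =
      (fun r => (r.1, ((r.2.1.length : Nat) : Int), r.2.2))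
        (altLoop g (2 + pvCost g ks PySem.Set.empty) [v] (PySem.Set.add visited v) 0) := by
  have h2 : 2 + pvCost g ks PySem.Set.empty = (1 + pvCost g ks PySem.Set.empty) + 1 := by omega
  have hcemp : ∀ (vis : PySem.Set Int), pvCost g ks vis ≤ pvCost g ks PySem.Set.empty := by
    intro vis
    refine pvCost_mono g ks PySem.Set.empty vis (fun x hx => ?_)
    simp [PySem.Set.contains, PySem.Set.empty] at hx
  have hmin0 : pvMin2 [((0 : Int), v)] = some ((0 : Int), v) := by
    rw [pvMin2_eq_fold]; rfl
  have hcond0 : ((0 : Int) == PySem.Set.len (PySem.Set.ofList [v])) = false := by rfl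
  have hgoalA : primLoop g ((1 + pvCost g ks PySem.Set.empty) + 1) [((0 : Int), v)] visited (PySem.Set.ofList [v]) 0 0 =
      primLoop g (1 + pvCost g ks PySem.Set.empty)
        ([] ++ ((g.getD v []).filter
          (fun p => !(PySem.Set.contains (PySem.Set.add visited v) p.1))).map (fun p => (p.2, p.1)))
        (PySem.Set.add visited v)
        ((g.getD v []).foldl
          (fun s p => if PySem.Set.contains (PySem.Set.add visited v) p.1 then s
            else PySem.Set.add s p.1) (PySem.Set.ofList [v]))
        (0 + 1) 0 := by
    simp only [primLoop, hcond0, hmin0, hv]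
    rw [show ([((0 : Int), v)].erase ((0 : Int), v)) = [] by simp]
    rw [pvFoldPair (fun p => PySem.Set.contains (PySem.Set.add visited v) p.1) (g.getD v []) (PySem.Set.ofList [v]) []]
    rfl
  rw [h2, hgoalA]
  have haddv : PySem.Set.contains (PySem.Set.add visited v) v = true :=
    (PySem.Set.contains_iff _ _).mpr ((PySem.Set.mem_add _ _ _).mpr (Or.inr rfl))
  have hpush : ∀ pw pu : Int,
      ((pw, pu) ∈ ((g.getD v []).filter
          (fun p => !(PySem.Set.contains (PySem.Set.add visited v) p.1))).map (fun p => (p.2, p.1)) ↔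
        ((pu, pw) ∈ g.getD v [] ∧ PySem.Set.contains (PySem.Set.add visited v) pu = false)) := by
    intro pw pu
    simp only [List.mem_map, List.mem_filter, Bool.not_eq_eq_eq_not, Bool.not_true]
    constructor
    · rintro ⟨⟨u, uw⟩, ⟨h1, h2⟩, he⟩
      rw [Prod.mk.injEq] at he
      obtain ⟨rfl, rfl⟩ := he
      exact ⟨h1, h2⟩
    · rintro ⟨h1, h2⟩
      exact ⟨(pu, pw), ⟨h1, h2⟩, rfl⟩
  have hv1 : PySem.Set.ofList [v] = [v] := rfl
  have hstep := pvLoopSim g ks hnd hks (1 + pvCost g ks PySem.Set.empty) ((1 + pvCost g ks PySem.Set.empty) + 1)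
    (((g.getD v []).filter
      (fun p => !(PySem.Set.contains (PySem.Set.add visited v) p.1))).map (fun p => (p.2, p.1)))
    (PySem.Set.add visited v)
    ((g.getD v []).foldl
      (fun s p => if PySem.Set.contains (PySem.Set.add visited v) p.1 then s
        else PySem.Set.add s p.1) (PySem.Set.ofList [v]))
    [v] 0 ?_ ?_ (by omega)
  · rw [List.nil_append]
    rw [show ((0 : Int) + 1) = ((([v] : List Int).length : Nat) : Int) by simp]
    exact hstep
  · refine ⟨by simp, ?_, PySem.Set.nodup_add _ _ hvn, pvNodupFoldAdd _ _ _ (by rw [hv1]; simp), ?_, ?_⟩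
    · intro t ht
      have : t = v := by simpa using ht
      exact this ▸ haddv
    · rintro ⟨pw, pu⟩
      have hcl : pvCutList g [v] (PySem.Set.add visited v) =
          ((g.getD v []).filter
            (fun p => !(PySem.Set.contains (PySem.Set.add visited v) p.1))).map (fun p => (p.2, p.1)) := by
        simp [pvCutList]
      rw [hcl]
      constructor
      · rintro ⟨hp, -⟩
        exact hp
      · intro hp
        exact ⟨hp, ((hpush pw pu).mp hp).2⟩
    · intro x
      rw [pvMemFoldAdd (fun p => PySem.Set.contains (PySem.Set.add visited v) p.1) (g.getD v []) (PySem.Set.ofList [v]) x]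
      rw [hv1]
      constructor
      · rintro (hx | ⟨q, hq, hqc, rfl⟩)
        · exact Or.inl hx
        · exact Or.inr ⟨(q.2, q.1), (hpush q.2 q.1).mpr ⟨by simp [hq], hqc⟩, rfl, hqc⟩
      · rintro (hx | ⟨⟨pw, pu⟩, hp, hpx, hpv⟩)
        · exact Or.inl hx
        · obtain ⟨h1, h2⟩ := (hpush pw pu).mp hp
          exact Or.inr ⟨(pu, pw), h1, by exact h2, by simp [← hpx]⟩
  · have hpl : (((g.getD v []).filter
        (fun p => !(PySem.Set.contains (PySem.Set.add visited v) p.1))).map (fun p => (p.2, p.1))).length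
          ≤ (g.getD v []).length := by
      rw [List.length_map]
      exact List.length_filter_le _ _
    by_cases hvk : v ∈ ks
    · have h1 := pvCost_add g ks hnd v hvk visited hv
      have h3 := hcemp visited
      omega
    · have hadj : g.getD v [] = [] := hks v hvk
      have h0 : (((g.getD v []).filter
          (fun p => !(PySem.Set.contains (PySem.Set.add visited v) p.1))).map (fun p => (p.2, p.1))).length = 0 := by
        rw [hadj]; rfl
      have h3 := hcemp (PySem.Set.add visited v)
      omega

-- the outer for-loops: both fold the same key list with identical state evolution
lemma pvFoldSim (g : PySem.Dict Int (List (Int × Int))) (ks : List Int)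
    (hnd : ks.Nodup) (hks : ∀ v : Int, v ∉ ks → g.getD v [] = []) (K : Int) :
    ∀ (l : List Int) (visited : PySem.Set Int) (acc : Int), visited.Nodup →
    l.foldl (fun (s : PySem.Set Int × Int) v =>
        if PySem.Set.contains s.1 v then s
        else
          let t := primLoop g (2 + pvCost g ks PySem.Set.empty) [((0 : Int), v)] s.1 (PySem.Set.ofList [v]) 0 0
          if PySem.Int.mod t.2.1 K == 0 then (t.2.2, s.2 + t.1) else (t.2.2, s.2)) (visited, acc)
      = l.foldl (fun (s : PySem.Set Int × Int) v =>
        if PySem.Set.contains s.1 v then s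
        else
          let t := altLoop g (2 + pvCost g ks PySem.Set.empty) [v] (PySem.Set.add s.1 v) 0
          if PySem.Int.mod ((t.2.1.length : Nat) : Int) K == 0 then (t.2.2, s.2 + t.1) else (t.2.2, s.2)) (visited, acc) := by
  intro l
  induction l with
  | nil => intro visited acc _; rfl
  | cons v t ih =>
    intro visited acc hvn
    simp only [List.foldl_cons]
    cases hc : PySem.Set.contains visited v with
    | true =>
      rw [if_pos rfl, if_pos rfl]
      exact ih visited acc hvn
    | false =>
      have hkey := pvKeyStep g ks hnd hks visited hvn v hc
      simp only [Bool.false_eq_true, if_false, hkey]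
      split <;> exact ih _ _ (pvAltNodup g _ _ _ _ (PySem.Set.nodup_add _ _ hvn))

-- ===== VERDICT (by name: the statement is the Claim_ definition above) =====
set_option maxHeartbeats 1000000 in
theorem through_all_spec : Claim_equal_through_all := by
  intro K graph _hdom _hpre
  show through_all K graph = through_all_alt K graph
  have h := pvFoldSim (PySem.Dict.mk graph) (PySem.List.dedup (graph.map (·.1)))
    (by rw [PySem.List.dedup_eq_ofList]; exact PySem.Set.nodup_ofList _)
    (fun v hv => pvGetD_nil graph v (fun hm => hv (by
      rw [PySem.List.dedup_eq_ofList]; exact (PySem.Set.mem_ofList _ _).mpr hm)))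
    K (PySem.List.dedup (graph.map (·.1))) PySem.Set.empty 0 (by simp [PySem.Set.empty])
  exact congrArg Prod.snd h
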